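-- pv_equiv track=rewrite | github.com/meh-sudhanshu/python_practice_codes | noNotebookNoPen/02-01-24/PrioritySum.py | prioritySum
-- ===== SOURCE A (Python) =====
-- def prioritySum(arr,priorityArray):
--     arr.sort()
--     priority = 1
--     ans = 0
--     for i in range(len(arr)-1,0,-1):
--         if priority in priorityArray:
--             ans+=arr[i]
--         if arr[i] != arr[i-1]:
--             priority+=1
--     return ans
-- ===== SOURCE B (Python) =====
-- def prioritySum(arr, priorityArray):
--     arr.sort()
--     rank = {}
--     r = 0
--     for v in reversed(arr):
--         if v not in rank:
--             r += 1
--             rank[v] = r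
--     pset = set(priorityArray)
--     return sum(v for v in arr[1:] if rank[v] in pset)
-- ===== Notes on version B (the rewrite author's own statement) =====
-- stated objective: faster
-- what changed: A fuses rank-tracking and summing in one index loop that scans priorityArray by list membership on every iteration; B builds a value-to-rank dictionary in one pass over the reversed sorted array, converts priorityArray to a set once, and then sums arr[1:] (A's loop never reaches index 0) in a separate pass keeping the elements whose rank is in the set.
import Mathlib
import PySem

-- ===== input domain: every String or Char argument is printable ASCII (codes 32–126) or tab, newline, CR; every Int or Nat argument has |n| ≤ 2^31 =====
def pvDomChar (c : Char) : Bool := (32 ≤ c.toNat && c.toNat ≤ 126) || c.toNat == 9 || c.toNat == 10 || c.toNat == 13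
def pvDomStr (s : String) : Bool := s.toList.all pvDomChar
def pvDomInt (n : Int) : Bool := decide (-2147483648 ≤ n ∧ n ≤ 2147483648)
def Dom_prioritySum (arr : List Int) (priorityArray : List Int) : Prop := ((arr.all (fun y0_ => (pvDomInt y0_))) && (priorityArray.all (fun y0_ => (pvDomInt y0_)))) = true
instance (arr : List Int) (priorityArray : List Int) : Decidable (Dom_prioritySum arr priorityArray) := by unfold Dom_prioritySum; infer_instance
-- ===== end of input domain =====

-- B builds a value→rank dictionary and a priority set once and then sums arr[1:] in a separate
-- pass, instead of A's fused index loop that rescans priorityArray each iteration; both Pythons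
-- sort arr in place, and the equivalence proved here is about the return value only.

-- ===== PORT A =====
def pvAStep (priorityArray : List Int) (s : List Int) (st : Int × Int) (i : Int) : Int × Int :=
  let ans := if st.1 ∈ priorityArray then st.2 + (PySem.List.pyGet? s i).getD 0 else st.2
  let priority := if (PySem.List.pyGet? s i).getD 0 ≠ (PySem.List.pyGet? s (i - 1)).getD 0
                  then st.1 + 1 else st.1
  (priority, ans)

def prioritySum (arr : List Int) (priorityArray : List Int) : Int :=
  let s := PySem.List.sorted arr (fun x => x)
  ((PySem.List.pyRange ((s.length : Int) - 1) 0 (-1)).foldl (pvAStep priorityArray s) (1, 0)).2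

-- ===== PORT B =====
def pvRankStep (st : PySem.Dict Int Int × Int) (v : Int) : PySem.Dict Int Int × Int :=
  if st.1.contains v then st else (st.1.insert v (st.2 + 1), st.2 + 1)

def prioritySum_alt (arr : List Int) (priorityArray : List Int) : Int :=
  let s := PySem.List.sorted arr (fun x => x)
  let rk := (s.reverse.foldl pvRankStep (PySem.Dict.empty, 0)).1
  let pset := PySem.Set.ofList priorityArray
  (PySem.List.slice s (some 1) none).foldl
    (fun acc v => if rk.getD v 0 ∈ pset then acc + v else acc) 0

-- ===== PRECONDITION & SPEC =====
def Spec_prioritySum (arr : List Int) (priorityArray : List Int) (out : Int) : Prop := out = prioritySum_alt arr priorityArray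
instance (arr : List Int) (priorityArray : List Int) (out : Int) : Decidable (Spec_prioritySum arr priorityArray out) := by unfold Spec_prioritySum; infer_instance

-- ===== CLAIM (what is proved, stated in full; the proofs are below) =====
def Claim_equal_prioritySum : Prop := ∀ (arr : List Int) (priorityArray : List Int), Dom_prioritySum arr priorityArray → Spec_prioritySum arr priorityArray (prioritySum arr priorityArray)

-- ===== LEMMAS AND PROOFS =====

-- Reference recursion for A's loop on the DESCENDING list (= reverse of the sorted array):
-- the last element (the minimum, index 0 of the sorted array) is never added.
def suffA (P : List Int) : Int → List Int → Int
  | _, [] => 0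
  | _, [_] => 0
  | p, x :: y :: r => (if p ∈ P then x else 0) + suffA P (if x = y then p else p + 1) (y :: r)

-- number of distinct values of t greater than v
def drk (t : List Int) (v : Int) : Nat := ({w ∈ t.toFinset | v < w}).card

lemma drk_cons_head {x : Int} {t : List Int} (h : List.Pairwise (· ≥ ·) (x :: t)) :
    drk (x :: t) x = 0 := by
  simp only [drk, Finset.card_eq_zero, Finset.filter_eq_empty_iff]
  intro w hw
  simp only [List.toFinset_cons, Finset.mem_insert, List.mem_toFinset] at hw
  rcases hw with rfl | hw
  · omega
  · have := (List.pairwise_cons.mp h).1 w hw; omega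

lemma drk_cons_of_lt {x v : Int} {t : List Int} (hx : x ∉ t) (hv : v < x) :
    drk (x :: t) v = drk t v + 1 := by
  simp only [drk, List.toFinset_cons]
  have hins : ({w ∈ insert x t.toFinset | v < w}) = insert x ({w ∈ t.toFinset | v < w}) := by
    ext w; simp only [Finset.mem_filter, Finset.mem_insert]
    constructor
    · rintro ⟨rfl | hw, hvw⟩
      · exact Or.inl rfl
      · exact Or.inr ⟨hw, hvw⟩
    · rintro (rfl | ⟨hw, hvw⟩)
      · exact ⟨Or.inl rfl, hv⟩
      · exact ⟨Or.inr hw, hvw⟩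
  rw [hins, Finset.card_insert_of_notMem]
  simp only [Finset.mem_filter, List.mem_toFinset]
  exact fun hc => hx hc.1

lemma drk_cons_of_mem {x v : Int} {t : List Int} (hx : x ∈ t) :
    drk (x :: t) v = drk t v := by
  simp only [drk, List.toFinset_cons, Finset.insert_eq_self.mpr (List.mem_toFinset.mpr hx)]

-- ---- A's index loop equals suffA on the reversed list ----

lemma pyGet?_snoc_lt {x : Int} {pre : List Int} {j : Int} (h0 : 0 ≤ j)
    (hl : j < (pre.length : Int)) :
    PySem.List.pyGet? (pre ++ [x]) j = PySem.List.pyGet? pre j := by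
  rw [PySem.List.pyGet?_of_nonneg _ h0, PySem.List.pyGet?_of_nonneg _ h0,
    List.getElem?_append_left (by omega)]

lemma foldA_eq_suffA (P : List Int) :
    ∀ (t : List Int) (p a : Int),
      ((PySem.List.pyRange ((t.length : Int) - 1) 0 (-1)).foldl (pvAStep P t.reverse) (p, a)).2
        = a + suffA P p t := by
  intro t
  induction t with
  | nil =>
    intro p a
    rw [show ((([] : List Int).length : Int) - 1) = -1 by simp,
      PySem.List.pyRange_neg_one_eq_nil (by norm_num)]
    simp [suffA]
  | cons x tail ih =>
    intro p a
    cases tail with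
    | nil =>
      rw [show ((([x] : List Int).length : Int) - 1) = 0 by simp,
        PySem.List.pyRange_neg_one_eq_nil (by norm_num)]
      simp [suffA]
    | cons y r =>
      set n : Nat := r.length + 2 with hn
      have hlen : ((x :: y :: r).length : Int) - 1 = (n : Int) - 1 := by simp [hn]; omega
      rw [hlen, PySem.List.pyRange_neg_one_cons (by push_cast; omega), List.foldl_cons]
      have hs : (x :: y :: r).reverse = (y :: r).reverse ++ [x] := by simp
      have hslen : (((y :: r).reverse.length : Int)) = (n : Int) - 1 := by simp [hn]; omega
      have hget1 : PySem.List.pyGet? ((x :: y :: r).reverse) ((n : Int) - 1) = some x := by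
        rw [hs, ← hslen]; exact PySem.List.pyGet?_append_length _ _ _
      have hget2 : PySem.List.pyGet? ((x :: y :: r).reverse) ((n : Int) - 1 - 1) = some y := by
        have hs2 : (x :: y :: r).reverse = r.reverse ++ y :: [x] := by simp
        have hrlen : ((r.reverse.length : Int)) = (n : Int) - 1 - 1 := by simp [hn]; ring
        rw [hs2, ← hrlen]
        exact PySem.List.pyGet?_append_length _ _ _
      have hstep : pvAStep P ((x :: y :: r).reverse) (p, a) ((n : Int) - 1)
          = ((if x = y then p else p + 1), a + (if p ∈ P then x else 0)) := by
        simp only [pvAStep, hget1, hget2, Option.getD_some]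
        by_cases hp : p ∈ P <;> by_cases hxy : x = y <;> simp [hp, hxy]
      rw [hstep]
      have hcongr : (PySem.List.pyRange ((n : Int) - 1 - 1) 0 (-1)).foldl
            (pvAStep P ((x :: y :: r).reverse))
            ((if x = y then p else p + 1), a + (if p ∈ P then x else 0))
          = (PySem.List.pyRange ((n : Int) - 1 - 1) 0 (-1)).foldl
            (pvAStep P ((y :: r).reverse))
            ((if x = y then p else p + 1), a + (if p ∈ P then x else 0)) := by
        apply PySem.List.foldl_congr_mem
        intro acc i hi
        have hib : 0 < i ∧ i ≤ (n : Int) - 2 := by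
          have := PySem.List.mem_pyRange_neg_one.mp hi
          exact ⟨by omega, by omega⟩
        simp only [pvAStep, hs]
        have hub2 : i < (((y :: r).reverse.length) : Int) := by rw [hslen]; omega
        have hub : i - 1 < (((y :: r).reverse.length) : Int) := by rw [hslen]; omega
        have h0i : (0 : Int) ≤ i := by omega
        have h0i1 : (0 : Int) ≤ i - 1 := by omega
        rw [pyGet?_snoc_lt h0i hub2, pyGet?_snoc_lt h0i1 hub]
      rw [hcongr]
      have hlen2 : (n : Int) - 1 - 1 = (((y :: r).length : Int)) - 1 := by simp [hn]; omega
      rw [hlen2, ih]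
      simp only [suffA]
      ring

-- ---- the rank dictionary built by B on a descending list ----

lemma rk_untouched : ∀ (t : List Int) (v : Int), v ∉ t →
    ∀ (d : PySem.Dict Int Int) (r : Int),
      ((t.foldl pvRankStep (d, r)).1).get? v = d.get? v := by
  intro t
  induction t with
  | nil => intro v _ d r; simp
  | cons x rest ih =>
    intro v hv d r
    have hvx : v ≠ x := fun h => hv (h ▸ List.mem_cons_self)
    have hvr : v ∉ rest := fun h => hv (List.mem_cons_of_mem _ h)
    simp only [List.foldl_cons, pvRankStep]
    by_cases hc : d.contains x
    · simp only [hc, if_true]; exact ih v hvr d r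
    · simp only [hc, Bool.false_eq_true, if_false]
      rw [ih v hvr _ _, PySem.Dict.get?_insert_of_ne _ _ hvx]

lemma rk_get : ∀ (t : List Int) (d : PySem.Dict Int Int) (r : Int),
    List.Pairwise (· ≥ ·) t →
    (∀ u : Int, (d.get? u).isSome → ∀ w ∈ t, w ≤ u) →
    (∀ w ∈ t, (d.get? w).isSome → d.get? w = some r) →
    ∀ v ∈ t, ((t.foldl pvRankStep (d, r)).1).get? v =
      some (if (d.get? v).isSome then r
            else r + 1 + ((drk (t.filter (fun w => (d.get? w).isNone)) v : Nat) : Int)) := by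
  intro t
  induction t with
  | nil => intro d r _ _ _ v hv; simp at hv
  | cons x rest ih =>
    intro d r hpw h2 h3 v hv
    have hxall : ∀ w ∈ rest, w ≤ x := fun w hw => (List.pairwise_cons.mp hpw).1 w hw
    have hpw' : List.Pairwise (· ≥ ·) rest := (List.pairwise_cons.mp hpw).2
    simp only [List.foldl_cons, pvRankStep, PySem.Dict.contains_eq_isSome_get?]
    by_cases hx : (d.get? x).isSome
    · -- head already keyed (a repeat of the run head); state unchanged
      have hxr : d.get? x = some r := h3 x List.mem_cons_self hx
      simp only [hx, if_true]
      have hfilter : (x :: rest).filter (fun w => (d.get? w).isNone) =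
          rest.filter (fun w => (d.get? w).isNone) := by
        simp [Option.isSome_iff_ne_none.mp hx]
      rcases List.mem_cons.mp hv with rfl | hvr
      · by_cases hvrest : v ∈ rest
        · rw [ih d r hpw' (fun u hu w hw => h2 u hu w (List.mem_cons_of_mem _ hw))
            (fun w hw hws => h3 w (List.mem_cons_of_mem _ hw) hws) v hvrest]
          simp [hx]
        · rw [rk_untouched rest v hvrest d r, hxr]
          simp
      · rw [ih d r hpw' (fun u hu w hw => h2 u hu w (List.mem_cons_of_mem _ hw))
          (fun w hw hws => h3 w (List.mem_cons_of_mem _ hw) hws) v hvr]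
        rw [hfilter]
    · -- fresh head: inserted with rank r+1
      simp only [hx, Bool.false_eq_true, if_false]
      have hx' : d.get? x = none := by
        cases h : d.get? x
        · rfl
        · rw [h] at hx; simp at hx
      have h2' : ∀ u : Int, (((d.insert x (r + 1)).get? u).isSome) → ∀ w ∈ rest, w ≤ u := by
        intro u hu w hw
        by_cases hux : u = x
        · subst hux; exact hxall w hw
        · rw [PySem.Dict.get?_insert_of_ne _ _ hux] at hu
          exact h2 u hu w (List.mem_cons_of_mem _ hw)
      have h3' : ∀ w ∈ rest, (((d.insert x (r + 1)).get? w).isSome) →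
          (d.insert x (r + 1)).get? w = some (r + 1) := by
        intro w hw hws
        by_cases hwx : w = x
        · subst hwx; exact PySem.Dict.get?_insert_self _ _ _
        · exfalso
          rw [PySem.Dict.get?_insert_of_ne _ _ hwx] at hws
          have hle : x ≤ w := h2 w hws x List.mem_cons_self
          exact hwx (le_antisymm (hxall w hw) hle)
      have hfilter : (x :: rest).filter (fun w => (d.get? w).isNone) =
          x :: rest.filter (fun w => (d.get? w).isNone) := by
        simp [hx']
      have hfilter' : rest.filter (fun w => ((d.insert x (r + 1)).get? w).isNone) =
          (rest.filter (fun w => (d.get? w).isNone)).filter (fun w => w ≠ x) := by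
        rw [List.filter_filter]
        apply List.filter_congr
        intro w _
        by_cases hwx : w = x
        · subst hwx; simp [PySem.Dict.get?_insert_self]
        · simp [PySem.Dict.get?_insert_of_ne _ _ hwx, hwx]
      have hpwf : List.Pairwise (· ≥ ·) (x :: rest.filter (fun w => (d.get? w).isNone)) := by
        rw [List.pairwise_cons]
        exact ⟨fun w hw => hxall w (List.mem_of_mem_filter hw), hpw'.filter _⟩
      rcases List.mem_cons.mp hv with rfl | hvr
      · have hval : ((rest.foldl pvRankStep (d.insert v (r + 1), r + 1)).1).get? v
            = some (r + 1) := by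
          by_cases hvrest : v ∈ rest
          · rw [ih (d.insert v (r + 1)) (r + 1) hpw' h2' h3' v hvrest]
            simp [PySem.Dict.get?_insert_self]
          · rw [rk_untouched rest v hvrest _ _, PySem.Dict.get?_insert_self]
        rw [hval, hfilter, drk_cons_head hpwf]
        simp [hx']
      · by_cases hvx : v = x
        · subst hvx
          have hval : ((rest.foldl pvRankStep (d.insert v (r + 1), r + 1)).1).get? v
              = some (r + 1) := by
            rw [ih (d.insert v (r + 1)) (r + 1) hpw' h2' h3' v hvr]
            simp [PySem.Dict.get?_insert_self]
          rw [hval, hfilter, drk_cons_head hpwf]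
          simp [hx']
        · have hvlt : v < x := lt_of_le_of_ne (hxall v hvr) hvx
          have hfresh : d.get? v = none := by
            cases h : d.get? v
            · rfl
            · exfalso
              have hvs : (d.get? v).isSome := by rw [h]; rfl
              have hle : x ≤ v := h2 v hvs x List.mem_cons_self
              omega
          rw [ih (d.insert x (r + 1)) (r + 1) hpw' h2' h3' v hvr]
          have hfresh' : (d.insert x (r + 1)).get? v = none := by
            rw [PySem.Dict.get?_insert_of_ne _ _ hvx]; exact hfresh
          simp only [hfresh, hfresh', Option.isSome_none, Bool.false_eq_true, if_false,
            hfilter, hfilter']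
          have hdk : drk (x :: rest.filter (fun w => (d.get? w).isNone)) v
              = drk ((rest.filter (fun w => (d.get? w).isNone)).filter (fun w => w ≠ x)) v + 1 := by
            simp only [drk, List.toFinset_cons]
            have hTset : (((rest.filter (fun w => (d.get? w).isNone)).filter
                (fun w => w ≠ x)).toFinset : Finset Int) =
                (rest.filter (fun w => (d.get? w).isNone)).toFinset.erase x := by
              ext w
              simp only [List.mem_toFinset, List.mem_filter, Finset.mem_erase, decide_eq_true_eq]
              tauto
            rw [hTset]
            set S : Finset Int := (rest.filter (fun w => (d.get? w).isNone)).toFinset with hS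
            have h1 : ({w ∈ insert x S | v < w}) = insert x ({w ∈ S.erase x | v < w}) := by
              ext w
              simp only [Finset.mem_filter, Finset.mem_insert, Finset.mem_erase]
              constructor
              · rintro ⟨rfl | hw, hvw⟩
                · exact Or.inl rfl
                · by_cases hwx : w = x
                  · exact Or.inl hwx
                  · exact Or.inr ⟨⟨hwx, hw⟩, hvw⟩
              · rintro (rfl | ⟨⟨_, hw⟩, hvw⟩)
                · exact ⟨Or.inl rfl, hvlt⟩
                · exact ⟨Or.inr hw, hvw⟩
            rw [h1, Finset.card_insert_of_notMem (by
              simp only [Finset.mem_filter, Finset.mem_erase]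
              rintro ⟨⟨hne, _⟩, _⟩; exact hne rfl)]
          rw [hdk]; push_cast; ring_nf

-- ---- suffA is the rank-filtered sum over all but the last element of a descending list ----

lemma suffA_eq_sum (P : List Int) :
    ∀ (t : List Int), List.Pairwise (· ≥ ·) t → ∀ p : Int,
      suffA P p t = (t.dropLast.map (fun v => if (p + (drk t v : Int)) ∈ P then v else 0)).sum := by
  intro t
  induction t with
  | nil => intro _ p; simp [suffA]
  | cons x tail ih =>
    intro hpw p
    have hxall : ∀ w ∈ tail, w ≤ x := fun w hw => (List.pairwise_cons.mp hpw).1 w hw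
    have hpw' : List.Pairwise (· ≥ ·) tail := (List.pairwise_cons.mp hpw).2
    have hx0 : drk (x :: tail) x = 0 := drk_cons_head hpw
    cases tail with
    | nil => simp [suffA]
    | cons y r =>
      have hcongr : ((y :: r).dropLast.map
            (fun v => if (p + (drk (x :: y :: r) v : Int)) ∈ P then v else 0))
          = ((y :: r).dropLast.map (fun v =>
              if ((if x = y then p else p + 1) + (drk (y :: r) v : Int)) ∈ P then v else 0)) := by
        apply List.map_congr_left
        intro v hvd
        have hv : v ∈ y :: r := List.mem_of_mem_dropLast hvd
        by_cases hxy : x = y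
        · have hxm : x ∈ y :: r := by rw [hxy]; exact List.mem_cons_self
          rw [drk_cons_of_mem hxm]
          simp [hxy]
        · have hyx : y < x := lt_of_le_of_ne (hxall y List.mem_cons_self) (fun h => hxy h.symm)
          have hxnot : x ∉ y :: r := by
            intro hc
            rcases List.mem_cons.mp hc with h | hcr
            · exact hxy h
            · have := (List.pairwise_cons.mp hpw').1 x hcr
              omega
          have hvle : v ≤ y := by
            rcases List.mem_cons.mp hv with rfl | hvr
            · exact le_refl v
            · exact (List.pairwise_cons.mp hpw').1 v hvr
          have hvlt : v < x := lt_of_le_of_lt hvle hyx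
          rw [drk_cons_of_lt hxnot hvlt]
          have harith : p + ((drk (y :: r) v + 1 : Nat) : Int)
              = (p + 1) + (drk (y :: r) v : Int) := by push_cast; ring
          rw [harith]
          simp [hxy]
      rw [List.dropLast_cons₂, List.map_cons, List.sum_cons, hx0]
      simp only [Nat.cast_zero, add_zero]
      rw [hcongr, ← ih hpw' (if x = y then p else p + 1)]
      simp [suffA]

-- ---- the ports both equal suffA on the reversed sorted list ----

lemma a_char (arr P : List Int) :
    prioritySum arr P = suffA P 1 ((PySem.List.sorted arr (fun x => x)).reverse) := by
  have h := foldA_eq_suffA P ((PySem.List.sorted arr (fun x => x)).reverse) 1 0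
  simp only [List.reverse_reverse, List.length_reverse] at h
  unfold prioritySum
  simpa using h

lemma pairwise_rev_sorted (arr : List Int) :
    List.Pairwise (· ≥ ·) (PySem.List.sorted arr (fun x => x)).reverse := by
  rw [List.pairwise_reverse]
  have := PySem.List.sorted_pairwise arr (fun x => x)
  simpa using this

lemma alt_char (arr P : List Int) :
    prioritySum_alt arr P = suffA P 1 ((PySem.List.sorted arr (fun x => x)).reverse) := by
  set s := PySem.List.sorted arr (fun x => x) with hs
  have hpw : List.Pairwise (· ≥ ·) s.reverse := pairwise_rev_sorted arr
  have hfilter : s.reverse.filter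
      (fun w => ((PySem.Dict.empty : PySem.Dict Int Int).get? w).isNone) = s.reverse := by
    simp [PySem.Dict.get?_empty]
  unfold prioritySum_alt
  rw [← hs]
  set rk := (s.reverse.foldl pvRankStep (PySem.Dict.empty, 0)).1 with hrk
  have hslice : PySem.List.slice s (some 1) none = s.drop 1 := by simp [pysem]
  simp only [hslice]
  have hsplit : (s.drop 1).foldl
        (fun acc v => if rk.getD v 0 ∈ PySem.Set.ofList P then acc + v else acc) 0
      = (s.drop 1).foldl
        (fun acc v => acc + (if rk.getD v 0 ∈ PySem.Set.ofList P then v else 0)) 0 := by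
    apply PySem.List.foldl_congr_mem
    intro acc v _
    by_cases hc : rk.getD v 0 ∈ PySem.Set.ofList P <;> simp [hc]
  rw [hsplit, PySem.List.foldl_add]
  have hmapc : (s.drop 1).map (fun v => if rk.getD v 0 ∈ PySem.Set.ofList P then v else 0)
      = (s.drop 1).map (fun v => if (1 + (drk s.reverse v : Int)) ∈ P then v else 0) := by
    apply List.map_congr_left
    intro v hv
    have hv' : v ∈ s.reverse := List.mem_reverse.mpr (List.mem_of_mem_drop hv)
    have hget := rk_get s.reverse PySem.Dict.empty 0 hpw
      (by intro u hu; simp [PySem.Dict.get?_empty] at hu)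
      (by intro w _ hw; simp [PySem.Dict.get?_empty] at hw) v hv'
    rw [hfilter] at hget
    rw [hrk] at *
    rw [PySem.Dict.getD_eq_get?_getD, hget]
    simp only [PySem.Dict.get?_empty, Option.isSome_none, Bool.false_eq_true, if_false,
      Option.getD_some]
    have harith : (0 : Int) + 1 + (drk s.reverse v : Int) = 1 + (drk s.reverse v : Int) := by ring
    rw [harith]
    by_cases hc : (1 + (drk s.reverse v : Int)) ∈ P
    · simp [PySem.Set.mem_ofList, hc]
    · simp [PySem.Set.mem_ofList, hc]
  rw [hmapc, suffA_eq_sum P s.reverse hpw 1]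
  have hdrop : s.reverse.dropLast = (s.drop 1).reverse := by
    cases s with
    | nil => rfl
    | cons a t => simp
  rw [hdrop, List.map_reverse, List.sum_reverse]
  simp

-- ===== VERDICT (by name: the statement is the Claim_ definition above) =====

theorem prioritySum_spec : Claim_equal_prioritySum := by
  intro arr P _
  unfold Spec_prioritySum
  rw [a_char, alt_char]
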